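-- pv_equiv track=rewrite | github.com/anamecheverri/mystery-word | mystery_word.py | update_word
-- ===== SOURCE A (Python) =====
-- def update_word(letter, word, wip):
--     indexes = []
--     counter = 0
--     while counter < len(word):
--         index_found = word.find(letter, counter)
--         if index_found != -1:
--             indexes.append(index_found)
--             counter = index_found + 1
--         else:
--             counter += 1
--     for index in indexes:
--         if index != -1:
--             wip[index] = letter
--     return wip
-- ===== SOURCE B (Python) =====
-- def update_word(letter, word, wip):
--     # Single pass: set wip[i] wherever letter occurs at position i of word.
--     # Mutates wip in place, like the original.
--     for i in range(len(word)):
--         if word.startswith(letter, i):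
--             wip[i] = letter
--     return wip
-- ===== Notes on version B (the rewrite author's own statement) =====
-- stated objective: alternative
-- what changed: Replaces the while-loop that repeatedly calls word.find (rescanning on every miss) plus a second loop over a collected index list by one enumerate-style pass that tests word.startswith(letter, i) and assigns wip[i] directly.
import Mathlib
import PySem

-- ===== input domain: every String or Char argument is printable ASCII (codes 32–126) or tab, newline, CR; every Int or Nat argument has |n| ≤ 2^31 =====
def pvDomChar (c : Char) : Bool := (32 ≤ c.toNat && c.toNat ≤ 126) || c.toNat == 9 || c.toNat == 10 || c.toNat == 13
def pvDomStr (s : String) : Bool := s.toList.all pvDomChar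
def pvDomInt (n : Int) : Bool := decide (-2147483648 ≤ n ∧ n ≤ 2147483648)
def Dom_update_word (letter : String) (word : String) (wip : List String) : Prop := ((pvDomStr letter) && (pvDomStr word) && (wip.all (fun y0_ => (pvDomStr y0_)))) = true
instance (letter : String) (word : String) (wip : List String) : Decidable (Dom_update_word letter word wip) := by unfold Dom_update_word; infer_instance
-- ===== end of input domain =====

-- B replaces A's find-driven while loop + index list by one pass setting wip[i] where letter occurs; both mutate wip in place in Python (return value is what is proved here).

-- ===== PORT A =====
-- the while loop: collect occurrence indexes via repeated word.find(letter, counter)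
def updLoop (letter word : List Char) (counter : Nat) (acc : List Int) : List Int :=
  if h : counter < word.length then
    let index_found := PySem.Chars.findFrom word letter (counter : Int)
    if hf : index_found ≠ -1 then
      updLoop letter word (index_found.toNat + 1) (acc ++ [index_found])
    else
      updLoop letter word (counter + 1) acc
  else acc
termination_by word.length - counter
decreasing_by
  · have hs := (PySem.Chars.findFrom_natCast_spec word letter counter (Nat.le_of_lt h) hf).1
    omega
  · omega

def update_word (letter : String) (word : String) (wip : List String) : List String :=
  let indexes := updLoop letter.toList word.toList 0 []
  indexes.foldl (fun w index =>
    if index ≠ -1 then PySem.List.pySetD w index letter else w) wip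

-- ===== PORT B =====
def update_word_alt (letter : String) (word : String) (wip : List String) : List String :=
  (List.range word.toList.length).foldl (fun w i =>
    if PySem.Chars.startswith (word.toList.drop i) letter.toList then
      PySem.List.pySetD w (i : Int) letter
    else w) wip

-- ===== PRECONDITION & SPEC =====
-- Pre_ excludes exactly the inputs on which Python A raises IndexError (an occurrence
-- position of letter in word, i.e. a position the first loop collects, is ≥ len(wip));
-- Python B raises IndexError on the same inputs.
def Pre_update_word (letter : String) (word : String) (wip : List String) : Prop :=
  ∀ i < word.toList.length, letter.toList <+: word.toList.drop i → i < wip.length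
instance (letter : String) (word : String) (wip : List String) : Decidable (Pre_update_word letter word wip) := by unfold Pre_update_word; infer_instance
def pvWitness_update_word : String × String × List String := ("a", "banana", ["_", "_", "_", "_", "_", "_"])

def Spec_update_word (letter : String) (word : String) (wip : List String) (out : List String) : Prop := out = update_word_alt letter word wip
instance (letter : String) (word : String) (wip : List String) (out : List String) : Decidable (Spec_update_word letter word wip out) := by unfold Spec_update_word; infer_instance

-- ===== CLAIM (what is proved, stated in full; the proofs are below) =====
def Claim_equal_update_word : Prop := ∀ (letter : String) (word : String) (wip : List String), Dom_update_word letter word wip → Pre_update_word letter word wip → Spec_update_word letter word wip (update_word letter word wip)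

-- ===== LEMMAS AND PROOFS =====

-- occurrence positions of letter in word from position c on, in increasing order
def occIdxs (letter word : List Char) (c : Nat) : List Nat :=
  (List.range' c (word.length - c)).filter (fun i => decide (letter <+: word.drop i))

theorem occIdxs_stop (letter word : List Char) (c : Nat) (h : ¬ c < word.length) :
    occIdxs letter word c = [] := by
  unfold occIdxs
  have : word.length - c = 0 := by omega
  simp [this]

theorem range'_split (c k n : Nat) (hk : k < n) :
    List.range' c n = List.range' c k ++ ((c + k) :: List.range' (c + k + 1) (n - k - 1)) := by
  have h1 : k + (n - k) = n := by omega
  rw [← h1, ← List.range'_append (s := c) (m := k) (n := n - k) (step := 1)]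
  have h2 : n - k = (n - k - 1) + 1 := by omega
  rw [h2, List.range'_succ]
  simp [Nat.add_assoc]

theorem updLoop_eq_aux (letter word : List Char) (n : Nat) : ∀ (c : Nat), word.length - c ≤ n →
    ∀ (acc : List Int), updLoop letter word c acc = acc ++ (occIdxs letter word c).map (Int.ofNat) := by
  induction n with
  | zero =>
    intro c hc acc
    have h : ¬ c < word.length := by omega
    rw [updLoop]
    simp [h, occIdxs_stop letter word c h]
  | succ n ih =>
    intro c hc acc
    rw [updLoop]
    by_cases h : c < word.length
    · rw [dif_pos h]
      set f := PySem.Chars.findFrom word letter (c : Int) with hfdef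
      by_cases hf : f ≠ -1
      · rw [dif_pos hf]
        have hs := PySem.Chars.findFrom_natCast_spec word letter c (Nat.le_of_lt h) hf
        obtain ⟨hcle, hpre, hmin⟩ := hs
        rw [← hfdef] at hcle hpre hmin
        have hfn : f.toNat < word.length := by
          by_cases hl : letter = []
          · -- empty letter occurs at c itself, so minimality forces f.toNat ≤ c
            have hocc : letter <+: word.drop c := by simp [hl]
            have : ¬ c < f.toNat := fun hlt => hmin c le_rfl hlt hocc
            omega
          · have : letter.length ≤ (word.drop f.toNat).length := hpre.length_le
            simp only [List.length_drop] at this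
            have hne : 0 < letter.length := List.length_pos_iff.mpr hl
            omega
        have hcf : c ≤ f.toNat := by omega
        rw [ih (f.toNat + 1) (by omega)]
        have hsplit : occIdxs letter word c = f.toNat :: occIdxs letter word (f.toNat + 1) := by
          unfold occIdxs
          have hk : f.toNat - c < word.length - c := by omega
          have hr := range'_split c (f.toNat - c) (word.length - c) hk
          have hfc : c + (f.toNat - c) = f.toNat := by omega
          have hc2 : word.length - c - (f.toNat - c) - 1 = word.length - (f.toNat + 1) := by omega
          rw [hfc, hc2] at hr
          rw [hr, List.filter_append, List.filter_cons]
          have hnil : (List.range' c (f.toNat - c)).filter (fun i => decide (letter <+: word.drop i)) = [] := by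
            rw [List.filter_eq_nil_iff]
            intro i hi
            rw [List.mem_range'] at hi
            obtain ⟨j, hj, hij⟩ := hi
            simp only [decide_eq_true_eq]
            exact hmin i (by omega) (by omega)
          rw [hnil]
          simp [hpre]
        rw [hsplit, List.map_cons]
        have hfval : Int.ofNat f.toNat = f := by
          have h0 : 0 ≤ f := le_trans (Int.natCast_nonneg c) hcle
          simpa using Int.toNat_of_nonneg h0
        rw [hfval]
        simp
      · rw [dif_neg hf]
        have hf' : f = -1 := not_not.mp hf
        rw [ih (c + 1) (by omega)]
        have hnone : ¬ letter <:+: word.drop c :=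
          (PySem.Chars.findFrom_natCast_eq_neg_one_iff word letter c (Nat.le_of_lt h)).mp hf'
        have hcfalse : ¬ letter <+: word.drop c := fun hp => hnone hp.isInfix
        have hstep : occIdxs letter word c = occIdxs letter word (c + 1) := by
          unfold occIdxs
          have hk : 0 < word.length - c := by omega
          have hr := range'_split c 0 (word.length - c) hk
          have hc2 : word.length - c - 0 - 1 = word.length - (c + 1) := by omega
          rw [hc2] at hr
          simp only [List.range'_zero, List.nil_append, Nat.add_zero] at hr
          rw [hr, List.filter_cons]
          simp [hcfalse]
        rw [hstep]
    · rw [dif_neg h]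
      simp [occIdxs_stop letter word c h]

theorem updLoop_eq (letter word : List Char) (c : Nat) (acc : List Int) :
    updLoop letter word c acc = acc ++ (occIdxs letter word c).map (Int.ofNat) :=
  updLoop_eq_aux letter word (word.length - c) c le_rfl acc

-- B's conditional fold over range n equals the unconditional fold over the occurrence list
theorem alt_eq_fold_occ (letter word : List Char) (s : String) (wip : List String) :
    (List.range word.length).foldl (fun w i =>
      if PySem.Chars.startswith (word.drop i) letter then
        PySem.List.pySetD w (i : Int) s
      else w) wip
    = (occIdxs letter word 0).foldl (fun w (i : Nat) => PySem.List.pySetD w (i : Int) s) wip := by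
  unfold occIdxs
  rw [Nat.sub_zero, ← List.range_eq_range', List.foldl_filter]
  apply List.foldl_ext
  intro w i _
  by_cases hp : letter <+: word.drop i
  · simp [hp, (PySem.Chars.startswith_iff _ _).mpr hp]
  · have : PySem.Chars.startswith (word.drop i) letter = false := by
      rw [Bool.eq_false_iff]
      simpa [PySem.Chars.startswith_iff] using hp
    simp [this, hp]

-- ===== VERDICT (by name: the statement is the Claim_ definition above) =====
theorem update_word_spec : Claim_equal_update_word := by
  intro letter word wip _ _
  unfold Spec_update_word update_word update_word_alt
  rw [updLoop_eq, List.nil_append, List.foldl_map,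
      alt_eq_fold_occ letter.toList word.toList letter wip]
  apply List.foldl_ext
  intro w i _
  simp
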